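-- pv_equiv track=rewrite | github.com/Burhan7007/call_scoring_ai | app.py | detect_language_from_country
-- ===== SOURCE A (Python) =====
-- def detect_language_from_country(phone: str):
--     if not phone:
--         return "en"
--     s = str(phone).lstrip("+")
--     mapping = {"39": "it", "34": "es", "359": "bg", "386": "sl", "30": "gr", "44": "en", "33": "fr", "49": "de"}
--     for pref, lang in sorted(mapping.items(), key=lambda x: -len(x[0])):
--         if s.startswith(pref):
--             return lang
--     return "en"
-- ===== SOURCE B (Python) =====
-- def detect_language_from_country(phone: str):
--     if not phone:
--         return "en"
--     s = str(phone).lstrip("+")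
--     c0, c1, c2 = s[0:1], s[1:2], s[2:3]
--     if c0 == "3":
--         if c1 == "9":
--             return "it"
--         if c1 == "4":
--             return "es"
--         if c1 == "0":
--             return "gr"
--         if c1 == "3":
--             return "fr"
--         if c1 == "5" and c2 == "9":
--             return "bg"
--         if c1 == "8" and c2 == "6":
--             return "sl"
--     elif c0 == "4":
--         if c1 == "4":
--             return "en"
--         if c1 == "9":
--             return "de"
--     return "en"
-- ===== Notes on version B (the rewrite author's own statement) =====
-- stated objective: alternative
-- what changed: Replaces the dict plus sort-and-startswith scan with a hand-compiled decision tree (trie) over the first three characters of the stripped number: no mapping table, no loop, just nested branches on s[0:1], s[1:2], s[2:3].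
import Mathlib
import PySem

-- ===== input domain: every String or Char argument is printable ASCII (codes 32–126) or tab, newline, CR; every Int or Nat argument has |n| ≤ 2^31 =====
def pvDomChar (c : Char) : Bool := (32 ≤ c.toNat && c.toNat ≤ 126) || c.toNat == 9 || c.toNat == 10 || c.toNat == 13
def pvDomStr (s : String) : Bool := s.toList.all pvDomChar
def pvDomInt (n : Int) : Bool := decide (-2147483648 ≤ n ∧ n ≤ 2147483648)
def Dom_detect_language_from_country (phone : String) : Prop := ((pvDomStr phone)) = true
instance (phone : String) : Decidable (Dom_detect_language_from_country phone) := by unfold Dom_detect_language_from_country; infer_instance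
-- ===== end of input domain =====

-- B replaces A's dict plus sort-and-startswith scan by a hand-compiled decision tree (trie)
-- over the first three characters of the stripped number (alternative; no table, no loop).

-- ===== PORT A =====
-- the dict literal as an association list in insertion order (keys as List Char)
def dlcMapping : List (List Char × String) :=
  [("39".toList, "it"), ("34".toList, "es"), ("359".toList, "bg"), ("386".toList, "sl"),
   ("30".toList, "gr"), ("44".toList, "en"), ("33".toList, "fr"), ("49".toList, "de")]

-- the 'for pref, lang in …: if s.startswith(pref): return lang' loop with its early return
def dlcALoop (items : List (List Char × String)) (s : List Char) : String :=
  match items with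
  | [] => "en"
  | (pref, lang) :: rest =>
      if PySem.Chars.startswith s pref then lang else dlcALoop rest s

def detect_language_from_country (phone : String) : String :=
  if phone.toList.isEmpty then "en"        -- 'if not phone'
  else
    -- s = str(phone).lstrip("+")  (hand port of lstrip with an explicit char set: exact)
    let s := phone.toList.dropWhile (· == '+')
    dlcALoop (PySem.List.sorted dlcMapping (fun x => -((x.1.length : Int))) false) s

-- ===== PORT B =====
-- decision tree on c0 = s[0:1], c1 = s[1:2], c2 = s[2:3]
def detect_language_from_country_alt (phone : String) : String :=
  if phone.toList.isEmpty then "en"        -- 'if not phone'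
  else
    let s := phone.toList.dropWhile (· == '+')   -- str(phone).lstrip("+") (hand port: exact)
    let c0 := PySem.List.slice s (some 0) (some 1)
    let c1 := PySem.List.slice s (some 1) (some 2)
    let c2 := PySem.List.slice s (some 2) (some 3)
    if c0 == "3".toList then
      if c1 == "9".toList then "it"
      else if c1 == "4".toList then "es"
      else if c1 == "0".toList then "gr"
      else if c1 == "3".toList then "fr"
      else if c1 == "5".toList && c2 == "9".toList then "bg"
      else if c1 == "8".toList && c2 == "6".toList then "sl"
      else "en"
    else if c0 == "4".toList then
      if c1 == "4".toList then "en"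
      else if c1 == "9".toList then "de"
      else "en"
    else "en"

-- ===== PRECONDITION & SPEC =====
def Spec_detect_language_from_country (phone : String) (out : String) : Prop := out = detect_language_from_country_alt phone
instance (phone : String) (out : String) : Decidable (Spec_detect_language_from_country phone out) := by unfold Spec_detect_language_from_country; infer_instance

-- ===== CLAIM (what is proved, stated in full; the proofs are below) =====
def Claim_equal_detect_language_from_country : Prop := ∀ (phone : String), Dom_detect_language_from_country phone → Spec_detect_language_from_country phone (detect_language_from_country phone)

-- ===== LEMMAS AND PROOFS =====

-- A's sorted item list, evaluated
theorem dlc_sortedA :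
    PySem.List.sorted dlcMapping (fun x => -((x.1.length : Int))) false =
    [("359".toList, "bg"), ("386".toList, "sl"), ("39".toList, "it"), ("34".toList, "es"),
     ("30".toList, "gr"), ("44".toList, "en"), ("33".toList, "fr"), ("49".toList, "de")] := by
  decide

-- B's body on a char list s, with the slices rewritten to take/drop
def dlcBTree (s : List Char) : String :=
  let c0 := s.take 1
  let c1 := (s.drop 1).take 1
  let c2 := (s.drop 2).take 1
  if c0 == "3".toList then
    if c1 == "9".toList then "it"
    else if c1 == "4".toList then "es"
    else if c1 == "0".toList then "gr"
    else if c1 == "3".toList then "fr"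
    else if c1 == "5".toList && c2 == "9".toList then "bg"
    else if c1 == "8".toList && c2 == "6".toList then "sl"
    else "en"
  else if c0 == "4".toList then
    if c1 == "4".toList then "en"
    else if c1 == "9".toList then "de"
    else "en"
  else "en"

-- core equivalence, for every character list s
set_option maxRecDepth 8000 in
theorem dlc_core (s : List Char) :
    dlcALoop [("359".toList, "bg"), ("386".toList, "sl"), ("39".toList, "it"), ("34".toList, "es"),
      ("30".toList, "gr"), ("44".toList, "en"), ("33".toList, "fr"), ("49".toList, "de")] s =
    dlcBTree s := by
  match s with
  | [] => decide
  | [a] =>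
      simp only [dlcALoop, dlcBTree]
      simp [PySem.Chars.startswith, List.isPrefixOf, List.take, List.drop, beq_eq_decide, @eq_comm Char]
  | [a, b] =>
      simp only [dlcALoop, dlcBTree]
      by_cases h1 : a = '3' <;> by_cases h2 : a = '4' <;> by_cases h3b : b = '9' <;>
        by_cases h4b : b = '4' <;> by_cases h5b : b = '0' <;> by_cases h6b : b = '3' <;>
        subst_vars <;>
        simp_all [PySem.Chars.startswith, List.isPrefixOf, List.take, List.drop, beq_eq_decide, @eq_comm Char]
  | a :: b :: c :: t =>
      simp only [dlcALoop, dlcBTree]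
      by_cases h1 : a = '3' <;> by_cases h2 : a = '4' <;> by_cases h3b : b = '9' <;>
        by_cases h4b : b = '4' <;> by_cases h5b : b = '0' <;> by_cases h6b : b = '3' <;>
        by_cases h7b : b = '5' <;> by_cases h8b : b = '8' <;>
        by_cases hc1 : c = '9' <;> by_cases hc2 : c = '6' <;> subst_vars <;>
        simp_all [PySem.Chars.startswith, List.isPrefixOf, List.take, List.drop, beq_eq_decide, @eq_comm Char]

theorem dlc_alt_eq_tree (phone : String) (h : phone.toList.isEmpty = false) :
    detect_language_from_country_alt phone = dlcBTree (phone.toList.dropWhile (· == '+')) := by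
  unfold detect_language_from_country_alt dlcBTree
  simp only [h, Bool.false_eq_true, ite_false]
  rw [PySem.List.slice_toNat _ (by norm_num) (by norm_num),
      PySem.List.slice_toNat _ (by norm_num) (by norm_num),
      PySem.List.slice_toNat _ (by norm_num) (by norm_num)]
  have h2 : ((2:Int)).toNat = 2 := rfl
  have h3 : ((3:Int)).toNat = 3 := rfl
  simp [h2, h3]

-- ===== VERDICT (by name: the statement is the Claim_ definition above) =====
theorem detect_language_from_country_spec : Claim_equal_detect_language_from_country := by
  intro phone _
  unfold Spec_detect_language_from_country
  by_cases h : phone.toList.isEmpty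
  · unfold detect_language_from_country detect_language_from_country_alt
    simp [h]
  · rw [dlc_alt_eq_tree phone (by simpa using h)]
    unfold detect_language_from_country
    simp only [h, Bool.false_eq_true, ite_false]
    rw [dlc_sortedA]
    exact dlc_core _
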